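-- pv_equiv track=rewrite | github.com/hayfa1/Waalaxy-Customer-Analysis | transforming_columns.py | staff_intervals
-- ===== SOURCE A (Python) =====
-- def staff_intervals(data):
--     new_staff_count=[]
--     #New staffCount
--     for i in range(0,len(data['staffCount'])):
--         if data['staffCount'][i]<=10:
--             new_staff_count.append("[0-10]")
--         elif data['staffCount'][i]<=50:
--             new_staff_count.append("[10-50]")
--         elif data['staffCount'][i]<=100:
--             new_staff_count.append("[50-100]")
--         elif data['staffCount'][i]<=500:
--             new_staff_count.append("[100-500]")
--         elif data['staffCount'][i]<=1000:
--             new_staff_count.append("[500-1000]")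
--         else:
--             new_staff_count.append(">1000")
--     return(new_staff_count)
-- ===== SOURCE B (Python) =====
-- def staff_intervals(data):
--     thresholds = [10, 50, 100, 500, 1000]
--     labels = ["[0-10]", "[10-50]", "[50-100]", "[100-500]", "[500-1000]", ">1000"]
--     out = []
--     for x in data['staffCount']:
--         # bisect_left: first index lo with x <= thresholds[lo] (len(thresholds) if none)
--         lo, hi = 0, len(thresholds)
--         while lo < hi:
--             mid = (lo + hi) // 2
--             if thresholds[mid] < x:
--                 lo = mid + 1
--             else:
--                 hi = mid
--         out.append(labels[lo])
--     return out
-- ===== Notes on version B (the rewrite author's own statement) =====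
-- stated objective: alternative
-- what changed: Replaces the five-way if/elif comparison cascade with a hand-written bisect_left binary search over a sorted threshold table paired with a label table.
import Mathlib
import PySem

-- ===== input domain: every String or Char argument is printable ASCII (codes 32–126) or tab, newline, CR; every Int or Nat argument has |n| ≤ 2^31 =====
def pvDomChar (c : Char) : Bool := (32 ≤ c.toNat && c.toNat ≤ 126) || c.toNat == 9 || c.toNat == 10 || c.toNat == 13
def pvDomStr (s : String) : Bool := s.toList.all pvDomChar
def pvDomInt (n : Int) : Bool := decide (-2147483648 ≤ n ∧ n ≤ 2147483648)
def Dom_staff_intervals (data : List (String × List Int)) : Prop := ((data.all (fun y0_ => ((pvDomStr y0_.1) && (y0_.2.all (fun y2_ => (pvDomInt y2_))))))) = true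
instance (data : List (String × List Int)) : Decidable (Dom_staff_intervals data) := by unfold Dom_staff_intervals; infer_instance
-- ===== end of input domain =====

-- B replaces A's if/elif comparison cascade with a binary search (bisect_left) over a
-- sorted threshold table paired with a label table; an alternative of the same cost.

-- ===== PORT A =====
-- literal transliteration: for i in range(0, len(data['staffCount'])): if/elif chain, append
def staff_intervals (data : List (String × List Int)) : List String :=
  let xs := PySem.Dict.getD (PySem.Dict.mk data) "staffCount" ([] : List Int)
  (PySem.List.pyRange 0 (xs.length : Int) 1).foldl (fun acc i =>
    let v := PySem.List.pyGetD xs i 0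
    acc ++ [if v ≤ 10 then "[0-10]"
            else if v ≤ 50 then "[10-50]"
            else if v ≤ 100 then "[50-100]"
            else if v ≤ 500 then "[100-500]"
            else if v ≤ 1000 then "[500-1000]"
            else ">1000"]) []

-- ===== PORT B =====
-- B's hand-written bisect_left loop; lo, hi stay ≥ 0 in Python so Nat with Nat division
-- is exact ((lo+hi)//2 = Nat div for nonnegative operands).
def pvBisect (ts : List Int) (x : Int) (lo hi : Nat) : Nat :=
  if h : lo < hi then
    let mid := (lo + hi) / 2
    if PySem.List.pyGetD ts (mid : Int) 0 < x then
      pvBisect ts x (mid + 1) hi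
    else
      pvBisect ts x lo mid
  else lo
termination_by hi - lo
decreasing_by all_goals omega

def staff_intervals_alt (data : List (String × List Int)) : List String :=
  let thresholds : List Int := [10, 50, 100, 500, 1000]
  let labels : List String := ["[0-10]", "[10-50]", "[50-100]", "[100-500]", "[500-1000]", ">1000"]
  (PySem.Dict.getD (PySem.Dict.mk data) "staffCount" ([] : List Int)).map (fun x =>
    PySem.List.pyGetD labels (↑(pvBisect thresholds x 0 thresholds.length)) "")

-- ===== PRECONDITION & SPEC =====
-- Pre_ excludes only inputs with no 'staffCount' key, on which Python A raises KeyError (B raises too).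
def Pre_staff_intervals (data : List (String × List Int)) : Prop :=
  (PySem.Dict.get? (PySem.Dict.mk data) "staffCount").isSome = true
instance (data : List (String × List Int)) : Decidable (Pre_staff_intervals data) := by
  unfold Pre_staff_intervals; infer_instance

def pvWitness_staff_intervals : (List (String × List Int)) :=
  [("staffCount", [3, 10, 11, 777])]

def Spec_staff_intervals (data : List (String × List Int)) (out : List String) : Prop := out = staff_intervals_alt data
instance (data : List (String × List Int)) (out : List String) : Decidable (Spec_staff_intervals data out) := by unfold Spec_staff_intervals; infer_instance

-- ===== CLAIM (what is proved, stated in full; the proofs are below) =====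
def Claim_equal_staff_intervals : Prop := ∀ (data : List (String × List Int)), Dom_staff_intervals data → Pre_staff_intervals data → Spec_staff_intervals data (staff_intervals data)

-- ===== LEMMAS AND PROOFS =====

-- the bisect loop's result on B's concrete tables, by case analysis
lemma pvBisect_val (x : Int) :
    pvBisect [10, 50, 100, 500, 1000] x 0 5 =
      (if x ≤ 10 then 0 else if x ≤ 50 then 1 else if x ≤ 100 then 2
       else if x ≤ 500 then 3 else if x ≤ 1000 then 4 else 5) := by
  simp [pvBisect, PySem.List.pyGetD, PySem.List.pyIdx?, PySem.List.pyGet?]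
  split_ifs <;> omega

-- pointwise: the cascade's label equals the table label at the bisect index
lemma pvLabel_eq (x : Int) :
    (if x ≤ 10 then "[0-10]"
     else if x ≤ 50 then "[10-50]"
     else if x ≤ 100 then "[50-100]"
     else if x ≤ 500 then "[100-500]"
     else if x ≤ 1000 then "[500-1000]"
     else ">1000")
    = PySem.List.pyGetD ["[0-10]", "[10-50]", "[50-100]", "[100-500]", "[500-1000]", ">1000"]
        (↑(pvBisect [10, 50, 100, 500, 1000] x 0 5)) "" := by
  rw [pvBisect_val]
  split_ifs <;> rfl

theorem staff_intervals_spec : Claim_equal_staff_intervals := by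
  intro data _ _
  unfold Spec_staff_intervals staff_intervals staff_intervals_alt
  rw [PySem.List.foldl_pyRange_zero_pyGetD'
        (PySem.Dict.getD (PySem.Dict.mk data) "staffCount" ([] : List Int)) 0
        (fun acc v => acc ++ [if v ≤ 10 then "[0-10]"
            else if v ≤ 50 then "[10-50]"
            else if v ≤ 100 then "[50-100]"
            else if v ≤ 500 then "[100-500]"
            else if v ≤ 1000 then "[500-1000]"
            else ">1000"]) [],
      PySem.List.foldl_append_singleton_eq_map, List.nil_append]
  exact List.map_congr_left (fun x _ => pvLabel_eq x)
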